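-- pv_equiv track=rewrite | github.com/Amangondaliya555/PyCaesar | PyCeaser.py | decrypt2
-- ===== SOURCE A (Python) =====
-- def decrypt2(shift):
--     shifted_alphabet_lines = ""
--     shift %= 26
--     alphabet = "abcdefghijklmnopqrstuvwxyz"
--     for i in range(len(alphabet)):
--         character = alphabet[i]
--         shifted_alphabet_lines += chr(122 - (122 - (ord(character) - shift)) % 26)
--     return shifted_alphabet_lines
-- ===== SOURCE B (Python) =====
-- def decrypt2(shift):
--     shift %= 26
--     alphabet = "abcdefghijklmnopqrstuvwxyz"
--     return alphabet[-shift:] + alphabet[:-shift]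
-- ===== Notes on version B (the rewrite author's own statement) =====
-- stated objective: simpler
-- what changed: Replaces the per-character loop with ord/chr modular arithmetic by a single slice-based rotation of the alphabet string after shift %= 26.
import Mathlib
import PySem

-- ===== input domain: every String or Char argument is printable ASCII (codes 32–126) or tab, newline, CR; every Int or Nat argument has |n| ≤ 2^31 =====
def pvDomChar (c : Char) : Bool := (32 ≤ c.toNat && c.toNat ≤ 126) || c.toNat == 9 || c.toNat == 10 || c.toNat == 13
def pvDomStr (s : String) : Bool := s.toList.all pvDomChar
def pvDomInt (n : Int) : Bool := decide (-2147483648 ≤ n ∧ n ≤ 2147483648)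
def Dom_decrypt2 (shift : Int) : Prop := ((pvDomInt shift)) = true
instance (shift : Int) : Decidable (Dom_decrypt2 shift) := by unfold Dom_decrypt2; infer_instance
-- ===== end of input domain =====

-- B replaces the per-character ord/chr modular arithmetic loop by a slice-based
-- rotation of the alphabet after shift %= 26 (objective: simpler).

-- ===== PORT A =====
def decrypt2 (shift : Int) : String :=
  let shift := PySem.Int.mod shift 26
  let alphabet := "abcdefghijklmnopqrstuvwxyz".toList
  let out := (PySem.List.pyRange 0 (alphabet.length : Int) 1).foldl (fun acc i =>
    let character := PySem.List.pyGetD alphabet i ' '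
    acc ++ [Char.ofNat (122 - PySem.Int.mod (122 - ((character.toNat : Int) - shift)) 26).toNat]) []
  String.mk out

-- ===== PORT B =====
def decrypt2_alt (shift : Int) : String :=
  let shift := PySem.Int.mod shift 26
  let alphabet := "abcdefghijklmnopqrstuvwxyz".toList
  String.mk (PySem.List.slice alphabet (some (-shift)) none ++
             PySem.List.slice alphabet none (some (-shift)))

-- ===== PRECONDITION & SPEC =====
def Spec_decrypt2 (shift : Int) (out : String) : Prop := out = decrypt2_alt shift
instance (shift : Int) (out : String) : Decidable (Spec_decrypt2 shift out) := by unfold Spec_decrypt2; infer_instance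

-- ===== CLAIM (what is proved, stated in full; the proofs are below) =====
def Claim_equal_decrypt2 : Prop := ∀ (shift : Int), Dom_decrypt2 shift → Spec_decrypt2 shift (decrypt2 shift)

-- ===== LEMMAS AND PROOFS =====

-- Both ports depend on shift only through PySem.Int.mod shift 26 ∈ [0, 26).
theorem decrypt2_eq_of_mod (shift r : Int) (h : PySem.Int.mod shift 26 = r)
    (h0 : 0 ≤ r) (h1 : r < 26) : decrypt2 shift = decrypt2_alt shift := by
  unfold decrypt2 decrypt2_alt
  rw [h]
  interval_cases r <;> decide

-- ===== VERDICT (by name: the statement is the Claim_ definition above) =====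
theorem decrypt2_spec : Claim_equal_decrypt2 := by
  intro shift _
  unfold Spec_decrypt2
  have hm : PySem.Int.mod shift 26 = shift % 26 := PySem.Int.mod_eq_emod_of_pos (by norm_num)
  exact decrypt2_eq_of_mod shift (shift % 26) hm (Int.emod_nonneg _ (by norm_num))
    (Int.emod_lt_of_pos _ (by norm_num))
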